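-- pv_equiv track=rewrite | github.com/jyjww/algorithm | 프로그래머스/2/42586. 기능개발/기능개발.py | solution
-- ===== SOURCE A (Python) =====
-- def solution(progresses, speeds):
--     answer = []
--     a = 0
--     for i in range(len(progresses)):
--         a = 100 - progresses[i]
--         cnt = 0
--         while a > 0:
--             a -= speeds[i]
--             cnt += 1
--         answer.append(cnt)
--     deploy = []
--     current = answer[0]
--     cnt = 1
--
--     for a in answer[1:]:
--         if a <= current:
--             # 기준일보다 빨리 끝나거나 같은 날 끝나면 배포
--             cnt += 1
--         else:
--             # 더 오래걸리는 기능은 새로운 배포 묶음 초기화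
--             deploy.append(cnt)
--             current = a
--             cnt = 1
--     deploy.append(cnt)
--
--     return deploy
-- ===== SOURCE B (Python) =====
-- def solution(progresses, speeds):
--     # closed-form ceiling days, then batch sizes as gaps between strict running-max boundary indices
--     days = [-((p - 100) // s) if p < 100 else 0 for p, s in zip(progresses, speeds)]
--     bounds = []
--     m = 0
--     for i, d in enumerate(days):
--         if not bounds or d > m:
--             bounds.append(i)
--             m = d
--     return [b - a for a, b in zip(bounds, bounds[1:] + [len(days)])]
-- ===== Notes on version B (the rewrite author's own statement) =====
-- stated objective: alternative
-- what changed: B computes each feature's remaining days by closed-form integer ceiling division instead of A's repeated-subtraction while loop, and derives batch sizes as gaps between strict running-max boundary indices instead of A's running counter with per-batch appends.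
-- outside the precondition, e.g. on solution([24, 100], [9]): A returns [2], B returns [1]
import Mathlib
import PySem

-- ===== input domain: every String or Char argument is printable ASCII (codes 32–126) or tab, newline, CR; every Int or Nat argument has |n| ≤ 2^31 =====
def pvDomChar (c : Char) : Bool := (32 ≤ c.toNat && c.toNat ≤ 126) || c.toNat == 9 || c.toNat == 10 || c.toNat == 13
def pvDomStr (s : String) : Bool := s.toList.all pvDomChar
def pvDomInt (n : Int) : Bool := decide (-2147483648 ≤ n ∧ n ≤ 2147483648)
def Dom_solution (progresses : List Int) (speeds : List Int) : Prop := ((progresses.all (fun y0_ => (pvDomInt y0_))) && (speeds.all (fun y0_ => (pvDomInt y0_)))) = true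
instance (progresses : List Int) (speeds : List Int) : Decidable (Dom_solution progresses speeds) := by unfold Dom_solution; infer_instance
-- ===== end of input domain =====

-- B replaces A's repeated-subtraction day count with closed-form ceiling division and builds
-- the batch sizes as gaps between strict running-max boundary indices instead of A's counter loop.

-- ===== PORT A =====
-- the 'while a > 0: a -= speeds[i]; cnt += 1' loop; fuel = a.toNat + 1 suffices whenever the
-- Python loop terminates (speed ≥ 1), which Pre_solution guarantees
def pyWhileA (fuel : Nat) (a s cnt : Int) : Int :=
  match fuel with
  | 0 => cnt
  | f + 1 => if 0 < a then pyWhileA f (a - s) s (cnt + 1) else cnt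

def solution (progresses : List Int) (speeds : List Int) : List Int :=
  let answer := (List.range progresses.length).foldl
    (fun acc (i : Nat) =>
      acc ++ [pyWhileA ((100 - PySem.List.pyGetD progresses (i : Int) 0).toNat + 1)
        (100 - PySem.List.pyGetD progresses (i : Int) 0)
        (PySem.List.pyGetD speeds (i : Int) 0) 0]) []
  let st := (PySem.List.slice answer (some 1) none).foldl
    (fun (st : List Int × Int × Int) a =>
      if a ≤ st.2.1 then (st.1, st.2.1, st.2.2 + 1)
      else (st.1 ++ [st.2.2], a, 1)) ([], PySem.List.pyGetD answer 0 0, 1)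
  st.1 ++ [st.2.2]

-- ===== PORT B =====
def solution_alt (progresses : List Int) (speeds : List Int) : List Int :=
  let days := (progresses.zip speeds).map
    (fun ps => if ps.1 < 100 then -(PySem.Int.floordiv (ps.1 - 100) ps.2) else 0)
  let bounds := ((PySem.List.enumerate days).foldl
    (fun (st : List Int × Int) id =>
      if st.1 = [] ∨ st.2 < id.2 then (st.1 ++ [id.1], id.2) else st) ([], 0)).1
  (bounds.zip (PySem.List.slice bounds (some 1) none ++ [(days.length : Int)])).map
    (fun ab => ab.2 - ab.1)

-- ===== PRECONDITION & SPEC =====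
-- Pre_ excludes: empty progresses (A raises IndexError on answer[0]); ragged input with speeds
-- shorter than progresses (malformed: A raises IndexError on speeds[i], except when every feature
-- beyond speeds is already ≥ 100, where A's counting of speedless features is accidental);
-- any unfinished feature with speed ≤ 0 (A's while loop never terminates there).
def Pre_solution (progresses : List Int) (speeds : List Int) : Prop :=
  progresses ≠ [] ∧ progresses.length ≤ speeds.length ∧
  ∀ ps ∈ progresses.zip speeds, ps.1 < 100 → 0 < ps.2
instance (progresses : List Int) (speeds : List Int) : Decidable (Pre_solution progresses speeds) := by
  unfold Pre_solution; infer_instance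
def pvWitness_solution : List Int × List Int := ([93, 30, 55], [1, 30, 5])

def Spec_solution (progresses : List Int) (speeds : List Int) (out : List Int) : Prop := out = solution_alt progresses speeds
instance (progresses : List Int) (speeds : List Int) (out : List Int) : Decidable (Spec_solution progresses speeds out) := by unfold Spec_solution; infer_instance

-- ===== CLAIM (what is proved, stated in full; the proofs are below) =====
def Claim_equal_solution : Prop := ∀ (progresses : List Int) (speeds : List Int), Dom_solution progresses speeds → Pre_solution progresses speeds → Spec_solution progresses speeds (solution progresses speeds)

-- ===== LEMMAS AND PROOFS =====

-- reference grouping: grp current cnt rest = batch sizes of the remaining days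
def grp : Int → Int → List Int → List Int
  | _, cnt, [] => [cnt]
  | cur, cnt, a :: t => if a ≤ cur then grp cur (cnt + 1) t else cnt :: grp a 1 t

-- reference boundary indices: bnds rest i m = strict running-max positions from index i
def bnds : List Int → Int → Int → List Int
  | [], _, _ => []
  | d :: t, i, m => if m < d then i :: bnds t (i + 1) d else bnds t (i + 1) m

-- A's grouping fold equals grp (with the accumulated prefix in front)
theorem foldA_grp (rest : List Int) : ∀ (dep : List Int) (cur cnt : Int),
    (let st := rest.foldl
      (fun (st : List Int × Int × Int) a =>
        if a ≤ st.2.1 then (st.1, st.2.1, st.2.2 + 1)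
        else (st.1 ++ [st.2.2], a, 1)) (dep, cur, cnt)
     st.1 ++ [st.2.2]) = dep ++ grp cur cnt rest := by
  induction rest with
  | nil => intro dep cur cnt; simp [grp]
  | cons a t ih =>
    intro dep cur cnt
    simp only [List.foldl_cons, grp]
    by_cases h : a ≤ cur
    · simp only [if_pos h]; exact ih dep cur (cnt + 1)
    · simp only [if_neg h]
      rw [ih (dep ++ [cnt]) a 1]; simp

-- B's boundary fold equals bnds once the accumulator is nonempty
theorem foldB_bnds (rest : List Int) : ∀ (bs : List Int) (i m : Int), bs ≠ [] →
    ((PySem.List.enumerate rest i).foldl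
      (fun (st : List Int × Int) id =>
        if st.1 = [] ∨ st.2 < id.2 then (st.1 ++ [id.1], id.2) else st) (bs, m)).1
    = bs ++ bnds rest i m := by
  induction rest with
  | nil => intro bs i m _; simp [PySem.List.enumerate, bnds]
  | cons d t ih =>
    intro bs i m hbs
    rw [show PySem.List.enumerate (d :: t) i = (i, d) :: PySem.List.enumerate t (i + 1) by
      simp [PySem.List.enumerate]]
    simp only [List.foldl_cons]
    by_cases h : m < d
    · simp only [if_pos (Or.inr h)]
      rw [ih (bs ++ [i]) (i + 1) d (by simp), bnds, if_pos h]
      simp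
    · have hc : ¬ (bs = [] ∨ m < d) := by simp [hbs, h]
      simp only [if_neg hc]
      rw [bnds, if_neg h]
      exact ih bs (i + 1) m hbs

-- gaps between boundary indices are exactly the grp batch sizes
theorem sizes_bnds (rest : List Int) : ∀ (i j m : Int),
    ((j :: bnds rest i m).zip ((bnds rest i m) ++ [i + (rest.length : Int)])).map
      (fun ab => ab.2 - ab.1) = grp m (i - j) rest := by
  induction rest with
  | nil => intro i j m; simp [bnds, grp]
  | cons d t ih =>
    intro i j m
    simp only [bnds, grp, List.length_cons]
    push_cast
    rw [show (i : Int) + ((t.length : Int) + 1) = i + 1 + (t.length : Int) by ring]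
    by_cases h : m < d
    · have hnd : ¬ d ≤ m := not_le.mpr h
      simp only [if_pos h, if_neg hnd]
      have H := ih (i + 1) i d
      rw [show (i : Int) + 1 - i = 1 by ring] at H
      simp only [List.cons_append, List.zip_cons_cons, List.map_cons]
      rw [H]
    · have hd : d ≤ m := not_lt.mp h
      simp only [if_neg h, if_pos hd]
      have H := ih (i + 1) j m
      rw [show (i : Int) + 1 - j = i - j + 1 by ring] at H
      exact H

-- A's while loop computes ceiling division -((-a) // s) for positive speed
theorem pyWhileA_eq (s : Int) (hs : 0 < s) : ∀ (fuel : Nat) (a cnt : Int), a.toNat < fuel →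
    pyWhileA fuel a s cnt = cnt + (if 0 < a then -(PySem.Int.floordiv (-a) s) else 0) := by
  intro fuel
  induction fuel with
  | zero => intro a cnt h; omega
  | succ f ih =>
    intro a cnt h
    by_cases ha : 0 < a
    · simp only [pyWhileA, if_pos ha]
      rw [ih (a - s) (cnt + 1) (by omega)]
      by_cases ha2 : 0 < a - s
      · have key : -(PySem.Int.floordiv (-a) s) = 1 + -(PySem.Int.floordiv (-(a - s)) s) := by
          rw [PySem.Int.floordiv_eq_ediv_of_pos hs, PySem.Int.floordiv_eq_ediv_of_pos hs]
          rw [show -(a - s) = -a + 1 * s by ring, Int.add_mul_ediv_right _ _ (ne_of_gt hs)]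
          ring
        simp only [if_pos ha2, key]; ring
      · have key : -(PySem.Int.floordiv (-a) s) = 1 :=
          (PySem.Int.neg_floordiv_neg_eq_iff_of_pos hs).mpr (by constructor <;> omega)
        simp only [if_neg ha2, key]; ring
    · simp [pyWhileA, ha]

-- the per-feature day counts of the two ports agree under Pre_
theorem answer_eq_days (progresses speeds : List Int)
    (hlen : progresses.length ≤ speeds.length)
    (hsp : ∀ ps ∈ progresses.zip speeds, ps.1 < 100 → 0 < ps.2) :
    (List.range progresses.length).map
      (fun (i : Nat) =>
        pyWhileA ((100 - PySem.List.pyGetD progresses (i : Int) 0).toNat + 1)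
          (100 - PySem.List.pyGetD progresses (i : Int) 0)
          (PySem.List.pyGetD speeds (i : Int) 0) 0)
    = (progresses.zip speeds).map
      (fun ps => if ps.1 < 100 then -(PySem.Int.floordiv (ps.1 - 100) ps.2) else 0) := by
  apply List.ext_getElem
  · simp [List.length_zip]; omega
  · intro i h1 h2
    simp only [List.getElem_map, List.getElem_range, List.getElem_zip]
    have hip : i < progresses.length := by simpa using h1
    have his : i < speeds.length := by omega
    rw [PySem.List.pyGetD_natCast, PySem.List.pyGetD_natCast,
      List.getD_eq_getElem _ _ hip, List.getD_eq_getElem _ _ his]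
    set p := progresses[i]
    set s := speeds[i]
    by_cases hp : p < 100
    · have hs : 0 < s := by
        apply hsp (p, s) _ hp
        rw [List.mem_iff_getElem]
        exact ⟨i, by simp [List.length_zip]; omega, by rw [List.getElem_zip]⟩
      rw [pyWhileA_eq s hs _ _ _ (by omega)]
      have h0 : (0:Int) < 100 - p := by omega
      simp only [if_pos h0, if_pos hp, zero_add]
      rw [show p - 100 = -(100 - p) by ring]
    · have h0 : ¬ (0:Int) < 100 - p := by omega
      simp [pyWhileA, hp]

-- ===== VERDICT (by name: the statement is the Claim_ definition above) =====
theorem solution_spec : Claim_equal_solution := by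
  intro progresses speeds _ hpre
  obtain ⟨hne, hlen, hsp⟩ := hpre
  unfold Spec_solution solution solution_alt
  simp only [PySem.List.foldl_append_singleton_eq_map, List.nil_append]
  rw [answer_eq_days progresses speeds hlen hsp]
  set days := (progresses.zip speeds).map
    (fun ps => if ps.1 < 100 then -(PySem.Int.floordiv (ps.1 - 100) ps.2) else 0) with hdays
  have hdne : days ≠ [] := by
    rw [hdays]
    simp only [ne_eq, List.map_eq_nil_iff, List.zip_eq_nil_iff]
    intro hc
    rcases hc with hc | hc
    · exact hne hc
    · exact hne (List.length_eq_zero_iff.mp (by rw [hc] at hlen; simpa using hlen))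
  obtain ⟨d, rest, hdr⟩ := List.exists_cons_of_ne_nil hdne
  rw [hdr]
  -- A side
  rw [show PySem.List.pyGetD (d :: rest) 0 0 = d by simp [PySem.List.pyGetD, PySem.List.pyIdx?,
    PySem.List.pyGet?]]
  rw [PySem.List.slice_from _ (by norm_num), show ((1:Int)).toNat = 1 by rfl, List.drop_succ_cons,
    List.drop_zero]
  rw [foldA_grp rest [] d 1, List.nil_append]
  -- B side
  rw [show PySem.List.enumerate (d :: rest) 0 = (0, d) :: PySem.List.enumerate rest 1 by
    simp [PySem.List.enumerate]]
  simp only [List.foldl_cons, List.nil_append, true_or, if_true]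
  rw [foldB_bnds rest [0] 1 d (by simp), List.singleton_append]
  rw [PySem.List.slice_from _ (by norm_num), show ((1:Int)).toNat = 1 by rfl, List.drop_succ_cons,
    List.drop_zero]
  have H := sizes_bnds rest 1 0 d
  rw [show (1 : Int) - 0 = 1 by ring] at H
  rw [show ((d :: rest).length : Int) = 1 + (rest.length : Int) by simp; ring]
  exact H.symm
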